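-- pv_equiv track=rewrite | github.com/Awesomeness360/MyWordle | wordle.py | wordScoresInOrder
-- ===== SOURCE A (Python) =====
-- def maxIndex(listOfNumbers):
--     maximum = max(listOfNumbers)
--     return listOfNumbers.index(maximum)
--
-- def wordScoresInOrder(listOfWords, listOfScores):
--     finalListOfWords = []
--     lengthOfList = len(listOfWords)
--     i = 0
--     while (i < lengthOfList):
--         index = maxIndex(listOfScores)
--         bestWord = listOfWords[index]
--         finalListOfWords.append(bestWord)
--         listOfWords = removeItem(listOfWords, index)
--         listOfScores = removeItem(listOfScores, index)
--         i += 1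
--     return finalListOfWords
--
-- def copyList(lst):
--     newList = []
--     i = 0
--     while (i < len(lst)):
--         newList.append(lst[i])
--         i += 1
--     return newList
--
-- def removeItem(lst, index):
--     newLst = copyList(lst)
--     del newLst[index]
--     return newLst
-- ===== SOURCE B (Python) =====
-- def wordScoresInOrder(listOfWords, listOfScores):
--     order = sorted(range(len(listOfWords)), key=lambda i: -listOfScores[i])
--     return [listOfWords[i] for i in order]
-- ===== Notes on version B (the rewrite author's own statement) =====
-- stated objective: faster
-- what changed: Replaces the repeated find-max-and-rebuild-both-lists selection loop by one stable sort of the indices on negated score (stability yields A's first-occurrence tie order), then a single indexing pass.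
-- outside the precondition, e.g. on wordScoresInOrder(['a'], [5, 3]): A returns ['a'], B returns ['a']
import Mathlib
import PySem

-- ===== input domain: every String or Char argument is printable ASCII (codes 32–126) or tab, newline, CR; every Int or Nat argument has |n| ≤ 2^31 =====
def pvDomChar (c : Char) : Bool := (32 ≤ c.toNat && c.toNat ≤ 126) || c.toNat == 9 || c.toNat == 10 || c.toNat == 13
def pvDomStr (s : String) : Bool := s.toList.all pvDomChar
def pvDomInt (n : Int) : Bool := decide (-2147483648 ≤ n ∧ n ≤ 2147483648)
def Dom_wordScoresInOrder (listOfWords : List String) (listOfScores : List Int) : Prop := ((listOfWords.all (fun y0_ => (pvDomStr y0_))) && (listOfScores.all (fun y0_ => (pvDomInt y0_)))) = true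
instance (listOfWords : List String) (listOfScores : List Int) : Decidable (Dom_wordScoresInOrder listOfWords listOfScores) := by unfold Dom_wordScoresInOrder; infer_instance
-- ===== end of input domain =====

-- B replaces A's quadratic select-max-and-rebuild loop by one stable sort of the
-- indices on negated score plus one indexing pass (equal for equal-length lists).

-- ===== PORT A =====
-- copyList: the while loop appending lst[i] for i = 0 .. len(lst)-1
def pvCopyList {α : Type} (d : α) (lst : List α) : List α :=
  (PySem.List.pyRange 0 (lst.length : Int) 1).foldl
    (fun acc i => acc ++ [PySem.List.pyGetD lst i d]) []

-- removeItem: copy then 'del newLst[index]'; exact for 0 ≤ index < len, which Pre_ guarantees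
def pvRemoveItem {α : Type} (d : α) (lst : List α) (index : Nat) : List α :=
  (pvCopyList d lst).eraseIdx index

-- maxIndex: max(lst) (ValueError on [] — excluded by Pre_) then lst.index(maximum)
def pvMaxIndex (lst : List Int) : Option Nat :=
  match PySem.List.max? lst (fun x => x) with
  | none => none
  | some m => PySem.List.index? lst m

-- the while loop of wordScoresInOrder; fuel = the fixed lengthOfList
def pvGoA : Nat → List String → List Int → List String → List String
  | 0, _, _, acc => acc
  | fuel+1, words, scores, acc =>
    match pvMaxIndex scores with
    | none => acc   -- Python raises ValueError here; excluded by Pre_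
    | some index =>
      let bestWord := PySem.List.pyGetD words (index : Int) ""  -- IndexError excluded by Pre_
      pvGoA fuel (pvRemoveItem "" words index) (pvRemoveItem 0 scores index)
        (acc ++ [bestWord])

def wordScoresInOrder (listOfWords : List String) (listOfScores : List Int) : List String :=
  pvGoA listOfWords.length listOfWords listOfScores []

-- ===== PORT B =====
def wordScoresInOrder_alt (listOfWords : List String) (listOfScores : List Int) : List String :=
  let order := PySem.List.sorted (PySem.List.pyRange 0 (listOfWords.length : Int) 1)
                 (fun i => -(PySem.List.pyGetD listOfScores i 0))
  order.map (fun i => PySem.List.pyGetD listOfWords i "")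

-- ===== PRECONDITION & SPEC =====
-- Pre_ requires the two lists to be equally long: on mismatched lengths A raises
-- (ValueError on max([]) once the scores run out, IndexError when the winning score's
-- index exceeds the word list) except in accidental cases where the surplus scores
-- never win — a corner no caller of this word/score pairing would specify.
def Pre_wordScoresInOrder (listOfWords : List String) (listOfScores : List Int) : Prop :=
  listOfWords.length = listOfScores.length
instance (listOfWords : List String) (listOfScores : List Int) : Decidable (Pre_wordScoresInOrder listOfWords listOfScores) := by unfold Pre_wordScoresInOrder; infer_instance

def pvWitness_wordScoresInOrder : List String × List Int := (["hi", "yo", "ok"], [1, 5, 5])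

def Spec_wordScoresInOrder (listOfWords : List String) (listOfScores : List Int) (out : List String) : Prop := out = wordScoresInOrder_alt listOfWords listOfScores
instance (listOfWords : List String) (listOfScores : List Int) (out : List String) : Decidable (Spec_wordScoresInOrder listOfWords listOfScores out) := by unfold Spec_wordScoresInOrder; infer_instance

-- ===== CLAIM (what is proved, stated in full; the proofs are below) =====
def Claim_equal_wordScoresInOrder : Prop := ∀ (listOfWords : List String) (listOfScores : List Int), Dom_wordScoresInOrder listOfWords listOfScores → Pre_wordScoresInOrder listOfWords listOfScores → Spec_wordScoresInOrder listOfWords listOfScores (wordScoresInOrder listOfWords listOfScores)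

-- ===== LEMMAS AND PROOFS =====
theorem pvCopyList_id {α : Type} (d : α) (lst : List α) : pvCopyList d lst = lst := by
  unfold pvCopyList
  rw [PySem.List.foldl_append_singleton_eq_map]
  simpa using PySem.List.map_pyGetD_pyRange_zero' lst d

theorem pvRemoveItem_map {α β : Type} (d : β) (f : α → β) (ps : List α) (k : Nat) :
    pvRemoveItem d (ps.map f) k = (ps.eraseIdx k).map f := by
  rw [pvRemoveItem, pvCopyList_id, List.eraseIdx_map]

theorem pvMaxIndex_lt {ss : List Int} {k : Nat} (h : pvMaxIndex ss = some k) :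
    k < ss.length := by
  rw [pvMaxIndex] at h
  rcases hm : PySem.List.max? ss (fun x => x) with _ | m
  · rw [hm] at h; simp at h
  · rw [hm] at h; simp at h
    obtain ⟨hk, _, _⟩ := PySem.List.getElem_of_index?_eq_some h
    exact hk

theorem pvInsertBy_congr {α : Type} (c₁ c₂ : α → α → Bool) (x : α) :
    ∀ (ys : List α), (∀ b ∈ ys, c₁ x b = c₂ x b) →
      PySem.List.insertBy c₁ x ys = PySem.List.insertBy c₂ x ys := by
  intro ys
  induction ys with
  | nil => intro _; rfl
  | cons y t ih =>
    intro h
    rw [PySem.List.insertBy.eq_2, PySem.List.insertBy.eq_2, h y (by simp),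
      ih (fun b hb => h b (by simp [hb]))]

theorem pvFoldl_insertBy_congr {α : Type} (c₁ c₂ : α → α → Bool)
    (hcong : ∀ x ys, (∀ b ∈ ys, c₁ x b = c₂ x b) →
      PySem.List.insertBy c₁ x ys = PySem.List.insertBy c₂ x ys) :
    ∀ (xs acc : List α),
      (∀ x ∈ xs, ∀ b ∈ acc, c₁ x b = c₂ x b) →
      xs.Pairwise (fun b x => c₁ x b = c₂ x b) →
      xs.foldl (fun acc x => PySem.List.insertBy c₁ x acc) acc
        = xs.foldl (fun acc x => PySem.List.insertBy c₂ x acc) acc := by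
  intro xs
  induction xs with
  | nil => intro acc _ _; rfl
  | cons y t ih =>
    intro acc hacc hpw
    simp only [List.foldl_cons]
    rw [hcong y acc (hacc y (by simp))]
    apply ih
    · intro x hx b hb
      rw [PySem.List.insertBy_mem_iff] at hb
      rcases hb with rfl | hb
      · exact (List.pairwise_cons.mp hpw).1 x hx
      · exact hacc x (by simp [hx]) b hb
    · exact (List.pairwise_cons.mp hpw).2

theorem pvKey_lt_iff (s : List Int) (n i j : Int)
    (hi0 : 0 ≤ i) (hin : i < n) (hj0 : 0 ≤ j) (hjn : j < n) :
    (n * (-(PySem.List.pyGetD s i 0)) + i < n * (-(PySem.List.pyGetD s j 0)) + j)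
      ↔ (-(PySem.List.pyGetD s i 0) < -(PySem.List.pyGetD s j 0)
         ∨ (PySem.List.pyGetD s i 0 = PySem.List.pyGetD s j 0 ∧ i < j)) := by
  set a := -(PySem.List.pyGetD s i 0) with ha
  set b := -(PySem.List.pyGetD s j 0) with hb
  constructor
  · intro h
    rcases lt_trichotomy a b with h1 | h1 | h1
    · exact Or.inl h1
    · exact Or.inr ⟨by omega, by rw [h1] at h; omega⟩
    · exfalso
      have : n * 1 ≤ n * (a - b) := by
        apply mul_le_mul_of_nonneg_left (by omega) (by omega)
      nlinarith
  · intro h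
    rcases h with h1 | ⟨h1, h2⟩
    · have : n * 1 ≤ n * (b - a) := by
        apply mul_le_mul_of_nonneg_left (by omega) (by omega)
      nlinarith
    · have : a = b := by omega
      rw [this]; omega

theorem pvSorted_key_eq_flat (s : List Int) (n : Int) :
    PySem.List.sorted (PySem.List.pyRange 0 n 1) (fun i => -(PySem.List.pyGetD s i 0))
      = PySem.List.sorted (PySem.List.pyRange 0 n 1)
          (fun i => n * (-(PySem.List.pyGetD s i 0)) + i) := by
  rw [PySem.List.sorted_eq_foldl_insertBy, PySem.List.sorted_eq_foldl_insertBy]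
  apply pvFoldl_insertBy_congr _ _ (pvInsertBy_congr _ _)
  · intro x _ b hb; simp at hb
  · have hm : (PySem.List.pyRange 0 n 1).Pairwise
        (fun b x => b ∈ PySem.List.pyRange 0 n 1 ∧ x ∈ PySem.List.pyRange 0 n 1 ∧ b < x) :=
      List.Pairwise.and_mem.mp (PySem.List.pairwise_lt_pyRange_one 0 n)
    refine hm.imp ?_
    rintro b x ⟨hbm, hxm, hbx⟩
    rw [PySem.List.mem_pyRange_one] at hbm hxm
    apply decide_eq_decide.mpr
    rw [pvKey_lt_iff s n x b hxm.1 hxm.2 hbm.1 hbm.2]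
    constructor
    · intro h; exact Or.inl h
    · rintro (h | ⟨h1, h2⟩)
      · exact h
      · omega

-- ghost selection on (original index, score) pairs, mirroring pvGoA's control flow
def pvSel : Nat → List (Int × Int) → List (Int × Int)
  | 0, _ => []
  | fuel+1, ps =>
    match pvMaxIndex (ps.map (·.2)) with
    | none => []
    | some k => ps.getD k (0, 0) :: pvSel fuel (ps.eraseIdx k)

theorem pvGoA_eq_sel (w : List String) :
    ∀ (fuel : Nat) (ps : List (Int × Int)) (acc : List String),
      pvGoA fuel (ps.map (fun p => PySem.List.pyGetD w p.1 "")) (ps.map (·.2)) acc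
        = acc ++ (pvSel fuel ps).map (fun p => PySem.List.pyGetD w p.1 "") := by
  intro fuel
  induction fuel with
  | zero => intro ps acc; simp [pvGoA, pvSel]
  | succ fuel ih =>
    intro ps acc
    rw [pvGoA, pvSel]
    rcases hmi : pvMaxIndex (ps.map (·.2)) with _ | k
    · rw [hmi]; simp
    · have hk : k < ps.length := by
        have := pvMaxIndex_lt hmi
        simpa using this
      rw [hmi]
      simp only []
      rw [pvRemoveItem_map, pvRemoveItem_map, ih]
      have hbw : PySem.List.pyGetD (ps.map (fun p => PySem.List.pyGetD w p.1 "")) (k : Int) ""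
          = PySem.List.pyGetD w (ps.getD k (0,0)).1 "" := by
        rw [PySem.List.pyGetD_natCast]
        rw [List.getD_eq_getElem?_getD, List.getD_eq_getElem?_getD,
          List.getElem?_map]
        rw [List.getElem?_eq_getElem hk]
        simp
      rw [hbw]
      simp

theorem pvMaxIndex_spec {ss : List Int} {k : Nat} (h : pvMaxIndex ss = some k) :
    ∃ hk : k < ss.length, (∀ y ∈ ss, y ≤ ss[k]) ∧ ∀ j (hj : j < k), ss[j] ≠ ss[k] := by
  rw [pvMaxIndex] at h
  rcases hm : PySem.List.max? ss (fun x => x) with _ | m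
  · rw [hm] at h; simp at h
  · rw [hm] at h; simp at h
    obtain ⟨hk, he, hfirst⟩ := PySem.List.getElem_of_index?_eq_some h
    have hmax := PySem.List.max?_isMax hm
    exact ⟨hk, by simpa [he] using hmax, by simpa [he] using hfirst⟩

theorem pvSel_aux : ∀ (fuel : Nat) (ps : List (Int × Int)), fuel = ps.length →
    (pvSel fuel ps).Perm ps := by
  intro fuel
  induction fuel with
  | zero => intro ps h; rw [pvSel]; rw [List.length_eq_zero_iff.mp h.symm]
  | succ fuel ih =>
    intro ps h
    rw [pvSel]
    rcases hmi : pvMaxIndex (ps.map (·.2)) with _ | k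
    · rw [pvMaxIndex] at hmi
      rcases hm : PySem.List.max? (ps.map (·.2)) (fun x => x) with _ | m
      · rw [PySem.List.max?_eq_none_iff] at hm
        simp only [List.map_eq_nil_iff] at hm
        rw [hm] at h; simp at h
      · rw [hm] at hmi
        have hmem : m ∈ ps.map (·.2) := PySem.List.max?_mem hm
        exact absurd ((PySem.List.index?_eq_none_iff _ _).mp hmi) (by simp [hmem])
    · have hk : k < ps.length := by simpa using pvMaxIndex_lt hmi
      have hperm := ih (ps.eraseIdx k) (by rw [List.length_eraseIdx]; simp [hk]; omega)
      have hgd : ps.getD k (0,0) = ps[k] := by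
        rw [List.getD_eq_getElem?_getD, List.getElem?_eq_getElem hk]; rfl
      rw [hmi]
      show (ps.getD k (0,0) :: pvSel fuel (ps.eraseIdx k)).Perm ps
      rw [hgd]
      exact List.Perm.trans (List.Perm.cons _ hperm) (List.getElem_cons_eraseIdx_perm hk)

theorem pvMem_eraseIdx {α : Type} {ps : List α} {k : Nat} {q : α} (h : q ∈ ps.eraseIdx k) :
    ∃ j, ∃ hj : j < ps.length, j ≠ k ∧ ps[j] = q := by
  rw [List.eraseIdx_eq_take_drop_succ] at h
  rcases List.mem_append.mp h with h | h
  · rw [List.mem_take_iff_getElem] at h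
    obtain ⟨j, hj, he⟩ := h
    exact ⟨j, by omega, by omega, he⟩
  · obtain ⟨j, hj, he⟩ := List.mem_iff_getElem.mp h
    rw [List.getElem_drop] at he
    have : j < ps.length - (k+1) := by simpa using hj
    exact ⟨k+1+j, by omega, by omega, he⟩

theorem pvSel_pairwise_aux : ∀ (fuel : Nat) (ps : List (Int × Int)), fuel = ps.length →
    ps.Pairwise (fun p q => p.1 < q.1) →
    (pvSel fuel ps).Pairwise (fun p q => q.2 < p.2 ∨ (p.2 = q.2 ∧ p.1 < q.1)) := by
  intro fuel
  induction fuel with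
  | zero => intro ps _ _; rw [pvSel]; exact List.Pairwise.nil
  | succ fuel ih =>
    intro ps h hpw
    rw [pvSel]
    rcases hmi : pvMaxIndex (ps.map (·.2)) with _ | k
    · rw [hmi]; exact List.Pairwise.nil
    · rw [hmi]
      show List.Pairwise _ (ps.getD k (0,0) :: pvSel fuel (ps.eraseIdx k))
      have hk : k < ps.length := by simpa using pvMaxIndex_lt hmi
      have hgd : ps.getD k (0,0) = ps[k] := by
        rw [List.getD_eq_getElem?_getD, List.getElem?_eq_getElem hk]; rfl
      have hlen : fuel = (ps.eraseIdx k).length := by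
        rw [List.length_eraseIdx]; simp [hk]; omega
      have hpw' : (ps.eraseIdx k).Pairwise (fun p q => p.1 < q.1) :=
        hpw.sublist (List.eraseIdx_sublist ps k)
      obtain ⟨hk', hmax, hfirst⟩ := pvMaxIndex_spec hmi
      refine List.Pairwise.cons ?_ (ih (ps.eraseIdx k) hlen hpw')
      intro q hq
      have hq' : q ∈ ps.eraseIdx k := ((pvSel_aux fuel _ hlen).mem_iff).mp hq
      obtain ⟨j, hj, hjk, rfl⟩ := pvMem_eraseIdx hq'
      have hle : ps[j].2 ≤ ps[k].2 := by
        have := hmax (ps[j].2) (by exact List.mem_map.mpr ⟨ps[j], by simp, rfl⟩)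
        simpa using this
      rw [hgd]
      rcases Nat.lt_or_ge j k with hlt | hge
      · left
        have hne : ps[j].2 ≠ ps[k].2 := by
          have := hfirst j (by omega)
          simpa using this
        omega
      · rcases eq_or_lt_of_le hle with heq | hlt2
        · right
          exact ⟨heq.symm, List.pairwise_iff_getElem.mp hpw k j hk hj (by omega)⟩
        · left; exact hlt2

theorem pvMain (w : List String) (s : List Int) (hpre : w.length = s.length) :
    pvGoA w.length w s []
      = ((PySem.List.sorted (PySem.List.pyRange 0 (w.length : Int) 1)
           (fun i => -(PySem.List.pyGetD s i 0))).map
         (fun i => PySem.List.pyGetD w i "")) := by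
  set n : Int := (w.length : Int) with hn
  set gs : Int → Int := fun j => PySem.List.pyGetD s j 0 with hgs
  set gw : Int → String := fun j => PySem.List.pyGetD w j "" with hgw
  set ps₀ : List (Int × Int) := (PySem.List.pyRange 0 n 1).map (fun j => (j, gs j)) with hps
  have h1 : ps₀.map (fun p => gw p.1) = w := by
    rw [hps, List.map_map]
    exact PySem.List.map_pyGetD_pyRange_zero' w ""
  have h2 : ps₀.map (·.2) = s := by
    rw [hps, List.map_map]
    show (PySem.List.pyRange 0 n 1).map (fun j => gs j) = s
    rw [hn, hpre]
    exact PySem.List.map_pyGetD_pyRange_zero' s 0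
  have h3 : ps₀.length = w.length := by
    rw [hps, List.length_map, PySem.List.length_pyRange_one]; omega
  have h4 : ps₀.Pairwise (fun p q => p.1 < q.1) := by
    rw [hps]
    exact (PySem.List.pairwise_lt_pyRange_one 0 n).map _ (fun a b hab => hab)
  have hmem : ∀ p ∈ ps₀, p.2 = gs p.1 ∧ 0 ≤ p.1 ∧ p.1 < n := by
    intro p hp
    rw [hps] at hp
    obtain ⟨j, hj, rfl⟩ := List.mem_map.mp hp
    rw [PySem.List.mem_pyRange_one] at hj
    exact ⟨rfl, hj.1, hj.2⟩
  -- A's loop = ghost selection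
  have hA : pvGoA w.length w s [] = (pvSel ps₀.length ps₀).map (fun p => gw p.1) := by
    conv_lhs => rw [← h1, ← h2]
    rw [List.length_map, pvGoA_eq_sel]
    simp [hgw]
  -- the chosen index sequence is sorted by the flat key
  set sel := pvSel ps₀.length ps₀ with hsel
  have hselmem : ∀ p ∈ sel, p ∈ ps₀ := fun p hp => ((pvSel_aux _ _ rfl).mem_iff).mp hp
  have h5 : ps₀.map (·.1) = PySem.List.pyRange 0 n 1 := by
    rw [hps, List.map_map, show ((·.1) ∘ fun j => (j, gs j)) = id from rfl, List.map_id]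
  have hperm : (sel.map (·.1)).Perm (PySem.List.pyRange 0 n 1) := by
    have h6 := (pvSel_aux ps₀.length ps₀ rfl).map (·.1)
    rw [← hsel, h5] at h6
    exact h6
  have hpwK : (sel.map (·.1)).Pairwise
      (fun a b => n * (-(gs a)) + a < n * (-(gs b)) + b) := by
    have hp := (pvSel_pairwise_aux ps₀.length ps₀ rfl h4)
    rw [List.pairwise_map]
    refine (List.Pairwise.and_mem.mp hp).imp ?_
    rintro p q ⟨hpm, hqm, hR⟩
    obtain ⟨hp2, hp0, hpn⟩ := hmem p (hselmem p hpm)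
    obtain ⟨hq2, hq0, hqn⟩ := hmem q (hselmem q hqm)
    rw [pvKey_lt_iff s n p.1 q.1 hp0 hpn hq0 hqn]
    show -(gs p.1) < -(gs q.1) ∨ (gs p.1 = gs q.1 ∧ p.1 < q.1)
    rw [← hp2, ← hq2]
    rcases hR with h | ⟨h, h'⟩
    · left; omega
    · right; exact ⟨h, h'⟩
  have hsorted : PySem.List.sorted (PySem.List.pyRange 0 n 1)
      (fun i => n * (-(gs i)) + i) = sel.map (·.1) :=
    PySem.List.sorted_eq_of_perm_of_pairwise_lt _ _ _ hperm hpwK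
  rw [hA, pvSorted_key_eq_flat s n]
  show sel.map (fun p => gw p.1)
    = (PySem.List.sorted (PySem.List.pyRange 0 n 1) (fun i => n * (-(gs i)) + i)).map gw
  rw [hsorted, List.map_map]
  rfl

-- ===== VERDICT (by name: the statement is the Claim_ definition above) =====
theorem wordScoresInOrder_spec : Claim_equal_wordScoresInOrder := by
  intro listOfWords listOfScores _ hpre
  unfold Spec_wordScoresInOrder wordScoresInOrder wordScoresInOrder_alt
  exact pvMain listOfWords listOfScores hpre
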